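-- pv_equiv track=rewrite | github.com/Astproducti8122/X-Dub | utils.py | make_pingpong_indices
-- ===== SOURCE A (Python) =====
-- def make_pingpong_indices(n: int, target_length: int):
--     assert n >= 1, "num_frames must be >= 1"
--     if target_length <= n:
--         return list(range(target_length))
--     if n == 1:
--         return [0] * target_length
--     period = 2 * (n - 1)
--     indices = []
--     for index in range(target_length):
--         remainder = index % period
--         indices.append(remainder if remainder < n else period - remainder)
--     return indices
-- ===== SOURCE B (Python) =====
-- def make_pingpong_indices(n: int, target_length: int):
--     assert n >= 1, "num_frames must be >= 1"
--     if target_length <= n: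
--         return list(range(target_length))
--     if n == 1:
--         return [0] * target_length
--     cycle = list(range(n)) + list(range(n - 2, 0, -1))
--     period = len(cycle)
--     return (cycle * (target_length // period + 1))[:target_length]
-- ===== Notes on version B (the rewrite author's own statement) =====
-- stated objective: alternative
-- what changed: Instead of computing a modulo-based triangle-wave value for every output index, B constructs the base ping-pong cycle once (ascending then descending half) and tiles it by list repetition and slicing.
import Mathlib
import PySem

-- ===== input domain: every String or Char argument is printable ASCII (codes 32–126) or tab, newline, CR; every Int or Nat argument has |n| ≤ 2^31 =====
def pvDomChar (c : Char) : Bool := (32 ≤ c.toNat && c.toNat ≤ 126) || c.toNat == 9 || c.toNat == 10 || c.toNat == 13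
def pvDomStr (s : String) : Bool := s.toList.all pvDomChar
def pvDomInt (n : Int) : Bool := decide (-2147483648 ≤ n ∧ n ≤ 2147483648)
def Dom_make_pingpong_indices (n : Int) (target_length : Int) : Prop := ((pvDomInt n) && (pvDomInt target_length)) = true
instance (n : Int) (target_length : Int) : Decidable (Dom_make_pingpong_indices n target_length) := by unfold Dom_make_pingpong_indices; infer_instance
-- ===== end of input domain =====

-- B builds the base ping-pong cycle once and tiles it by repetition and slicing,
-- instead of A's per-index modulo arithmetic (objective: alternative construction).

-- ===== PORT A =====
def make_pingpong_indices (n : Int) (target_length : Int) : List Int :=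
  if target_length ≤ n then PySem.List.pyRange 0 target_length 1
  else if n = 1 then PySem.List.pyRepeat [(0 : Int)] target_length
  else
    let period := 2 * (n - 1)
    (PySem.List.pyRange 0 target_length 1).foldl
      (fun indices index =>
        let remainder := PySem.Int.mod index period
        indices ++ [if remainder < n then remainder else period - remainder]) []

-- ===== PORT B =====
def make_pingpong_indices_alt (n : Int) (target_length : Int) : List Int :=
  if target_length ≤ n then PySem.List.pyRange 0 target_length 1
  else if n = 1 then PySem.List.pyRepeat [(0 : Int)] target_length
  else
    let cycle := PySem.List.pyRange 0 n 1 ++ PySem.List.pyRange (n - 2) 0 (-1)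
    let period : Int := cycle.length
    PySem.List.slice (PySem.List.pyRepeat cycle (PySem.Int.floordiv target_length period + 1))
      none (some target_length)

-- ===== PRECONDITION & SPEC =====
-- Pre_ excludes exactly the inputs with n < 1, on which A's assert raises AssertionError.
def Pre_make_pingpong_indices (n : Int) (target_length : Int) : Prop := 1 ≤ n
instance (n : Int) (target_length : Int) : Decidable (Pre_make_pingpong_indices n target_length) := by unfold Pre_make_pingpong_indices; infer_instance
def pvWitness_make_pingpong_indices : Int × Int := (3, 8)

def Spec_make_pingpong_indices (n : Int) (target_length : Int) (out : List Int) : Prop := out = make_pingpong_indices_alt n target_length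
instance (n : Int) (target_length : Int) (out : List Int) : Decidable (Spec_make_pingpong_indices n target_length out) := by unfold Spec_make_pingpong_indices; infer_instance

-- ===== CLAIM (what is proved, stated in full; the proofs are below) =====
def Claim_equal_make_pingpong_indices : Prop := ∀ (n : Int) (target_length : Int), Dom_make_pingpong_indices n target_length → Pre_make_pingpong_indices n target_length → Spec_make_pingpong_indices n target_length (make_pingpong_indices n target_length)

-- ===== LEMMAS AND PROOFS =====

theorem pv_flatten_replicate_getElem? {α : Type} (c : List α) (m i : Nat)
    (h : i < m * c.length) :
    getElem? (List.replicate m c).flatten i = getElem? c (i % c.length) := by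
  induction m generalizing i with
  | zero => omega
  | succ m ih =>
    rw [List.replicate_succ, List.flatten_cons]
    by_cases hi : i < c.length
    · rw [List.getElem?_append_left hi, Nat.mod_eq_of_lt hi]
    · push_neg at hi
      rw [List.getElem?_append_right hi]
      have h' : i < m * c.length + c.length := by rw [Nat.succ_mul] at h; exact h
      have hj : i - c.length < m * c.length := by omega
      rw [ih _ hj]
      congr 1
      exact (Nat.mod_eq_sub_mod hi).symm

-- the base cycle, indexed: ascending half then descending half
theorem pv_cycle_getElem? (n : Int) (hn : 2 ≤ n) (r : Nat) (hr : (r : Int) < 2 * (n - 1)) :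
    getElem? (PySem.List.pyRange 0 n 1 ++ PySem.List.pyRange (n - 2) 0 (-1)) r =
      some (if (r : Int) < n then (r : Int) else 2 * (n - 1) - (r : Int)) := by
  have hnn : ((n.toNat : Nat) : Int) = n := Int.toNat_of_nonneg (by omega)
  have hmm : (((n - 2).toNat : Nat) : Int) = n - 2 := Int.toNat_of_nonneg (by omega)
  rw [PySem.List.pyRange_one, PySem.List.pyRange_neg_one]
  simp only [sub_zero]
  by_cases h : r < n.toNat
  · rw [List.getElem?_append_left (by simpa using h)]
    rw [List.getElem?_map, List.getElem?_range h]
    have hrn : (r : Int) < n := by omega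
    simp [if_pos hrn]
  · push_neg at h
    rw [List.getElem?_append_right (by simpa using h)]
    simp only [List.length_map, List.length_range]
    have hj : r - n.toNat < (n - 2).toNat := by omega
    rw [List.getElem?_map, List.getElem?_range hj]
    have hrn : ¬ ((r : Int) < n) := by omega
    have hv : n - 2 - ((r - n.toNat : Nat) : Int) = 2 * (n - 1) - (r : Int) := by omega
    simp [if_neg hrn, hv]

theorem make_pingpong_indices_eq_alt (n t : Int) (hpre : 1 ≤ n) :
    make_pingpong_indices n t = make_pingpong_indices_alt n t := by
  by_cases ht : t ≤ n
  · simp [make_pingpong_indices, make_pingpong_indices_alt, ht]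
  · by_cases h1 : n = 1
    · simp [make_pingpong_indices, make_pingpong_indices_alt, h1]
    · have hn : 2 ≤ n := by omega
      have ht' : n < t := by omega
      have hp : (0:Int) < 2 * (n - 1) := by omega
      simp only [make_pingpong_indices, make_pingpong_indices_alt, if_neg ht, if_neg h1]
      -- cycle and its length
      set c : List Int := PySem.List.pyRange 0 n 1 ++ PySem.List.pyRange (n - 2) 0 (-1) with hc
      have hlen : ((c.length : Nat) : Int) = 2 * (n - 1) := by
        rw [hc]
        simp only [List.length_append, PySem.List.pyRange_one, PySem.List.pyRange_neg_one,
          List.length_map, List.length_range, sub_zero]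
        push_cast
        rw [Int.toNat_of_nonneg (by omega : (0:Int) ≤ n),
            Int.toNat_of_nonneg (by omega : (0:Int) ≤ n - 2)]
        ring
      have hL : 0 < c.length := by omega
      -- left side: the foldl is a map
      rw [PySem.List.foldl_append_singleton_eq_map, List.nil_append]
      -- right side: floordiv and slice in elementary form
      rw [show PySem.Int.floordiv t (c.length : Int) = t / (2 * (n - 1)) by
            rw [hlen]; exact PySem.Int.floordiv_eq_ediv_of_pos hp]
      rw [PySem.List.slice_to _ (by omega : (0:Int) ≤ t)]
      simp only [PySem.List.pyRepeat]
      -- number of copies covers t.toNat entries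
      have hM : t.toNat ≤ (t / (2 * (n - 1)) + 1).toNat * c.length := by
        have h2 : t < (t / (2 * (n - 1)) + 1) * (2 * (n - 1)) :=
          Int.lt_ediv_add_one_mul_self t hp
        have hq : (0:Int) ≤ t / (2 * (n - 1)) + 1 := by
          have := Int.ediv_nonneg (by omega : (0:Int) ≤ t) (le_of_lt hp); omega
        have hcast : (((t / (2 * (n - 1)) + 1).toNat * c.length : Nat) : Int)
            = (t / (2 * (n - 1)) + 1) * (2 * (n - 1)) := by
          push_cast [Int.toNat_of_nonneg hq, hlen]
          ring
        omega
      -- pointwise comparison of the two lists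
      rw [PySem.List.pyRange_one]
      simp only [sub_zero, List.map_map]
      apply List.ext_getElem?
      intro i
      rw [List.getElem?_map, List.getElem?_take]
      by_cases hi : i < t.toNat
      · rw [List.getElem?_range hi, if_pos hi]
        rw [pv_flatten_replicate_getElem? c _ i (by omega)]
        have hrlt : ((i % c.length : Nat) : Int) < 2 * (n - 1) := by
          have := Nat.mod_lt i hL
          omega
        rw [pv_cycle_getElem? n hn (i % c.length) hrlt]
        have hmod : PySem.Int.mod ((0:Int) + (i : Int)) (2 * (n - 1))
            = ((i % c.length : Nat) : Int) := by
          rw [zero_add, ← hlen, PySem.Int.mod_natCast]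
        simp only [Option.map_some, Function.comp_apply, hmod]
      · rw [if_neg hi, List.getElem?_eq_none (by simpa using Nat.le_of_not_lt hi)]
        rfl

-- ===== VERDICT (by name: the statement is the Claim_ definition above) =====
theorem make_pingpong_indices_spec : Claim_equal_make_pingpong_indices := by
  intro n t _ hpre
  unfold Spec_make_pingpong_indices
  exact make_pingpong_indices_eq_alt n t hpre
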